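-- pv_equiv track=rewrite | github.com/LT-aitools/rent-vs-buy-decision-tool | src/components/enhanced/interactive_charts.py | _generate_cash_flow_data
-- ===== SOURCE A (Python) =====
-- from typing import Dict, List, Optional, Tuple, Any, Union
--
-- def _generate_cash_flow_data(data: Any, time_range: Tuple[int, int], cash_flow_type: str, aggregation: str) -> Dict:
--     """Generate cash flow data for visualization"""
--     start_year, end_year = time_range
--     years = list(range(start_year, end_year + 1))
--
--     # Mock cash flow generation
--     buy_cf = []
--     rent_cf = []
--
--     for year in years:
--         # Buy scenario: initial negative, then positive
--         buy_annual = -50000 if year == 1 else 15000 + (year - 1) * 500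
--
--         # Rent scenario: consistently negative but increasing
--         rent_annual = -12000 - (year - 1) * 300
--
--         if aggregation == "Cumulative":
--             buy_cf.append(sum([buy_cf[-1] if buy_cf else 0, buy_annual]))
--             rent_cf.append(sum([rent_cf[-1] if rent_cf else 0, rent_annual]))
--         else:
--             buy_cf.append(buy_annual)
--             rent_cf.append(rent_annual)
--
--     return {
--         'years': years,
--         'buy_cash_flow': buy_cf,
--         'rent_cash_flow': rent_cf
--     }
-- ===== SOURCE B (Python) =====
-- def _generate_cash_flow_data(data, time_range, cash_flow_type, aggregation):
--     """Generate cash flow data; cumulative values via closed-form prefix sums (no running accumulator)."""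
--     start_year, end_year = time_range
--     years = list(range(start_year, end_year + 1))
--
--     if aggregation == "Cumulative":
--         # sum over k in [start_year..y] of the annual formulas, in closed form:
--         # t(y) = sum of (k-1) = (y-start_year+1)*(start_year+y-2)//2 (always an exact half)
--         def buy_total(y):
--             n = y - start_year + 1
--             t = n * (start_year + y - 2) // 2
--             total = 15000 * n + 500 * t
--             if start_year <= 1 <= y:
--                 total -= 65000  # year 1 contributes -50000, not 15000
--             return total
--
--         def rent_total(y):
--             n = y - start_year + 1
--             t = n * (start_year + y - 2) // 2
--             return -12000 * n - 300 * t
--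
--         buy_cf = [buy_total(y) for y in years]
--         rent_cf = [rent_total(y) for y in years]
--     else:
--         buy_cf = [-50000 if y == 1 else 15000 + (y - 1) * 500 for y in years]
--         rent_cf = [-12000 - (y - 1) * 300 for y in years]
--
--     return {
--         'years': years,
--         'buy_cash_flow': buy_cf,
--         'rent_cash_flow': rent_cf
--     }
-- ===== Notes on version B (the rewrite author's own statement) =====
-- stated objective: alternative
-- what changed: Replaces A's running-sum loop (reading back the last appended element) with a closed-form arithmetic-series formula that computes each cumulative value directly per year (plus a one-off -65000 correction when year 1 is in range), with no accumulator at all.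
import Mathlib
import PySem

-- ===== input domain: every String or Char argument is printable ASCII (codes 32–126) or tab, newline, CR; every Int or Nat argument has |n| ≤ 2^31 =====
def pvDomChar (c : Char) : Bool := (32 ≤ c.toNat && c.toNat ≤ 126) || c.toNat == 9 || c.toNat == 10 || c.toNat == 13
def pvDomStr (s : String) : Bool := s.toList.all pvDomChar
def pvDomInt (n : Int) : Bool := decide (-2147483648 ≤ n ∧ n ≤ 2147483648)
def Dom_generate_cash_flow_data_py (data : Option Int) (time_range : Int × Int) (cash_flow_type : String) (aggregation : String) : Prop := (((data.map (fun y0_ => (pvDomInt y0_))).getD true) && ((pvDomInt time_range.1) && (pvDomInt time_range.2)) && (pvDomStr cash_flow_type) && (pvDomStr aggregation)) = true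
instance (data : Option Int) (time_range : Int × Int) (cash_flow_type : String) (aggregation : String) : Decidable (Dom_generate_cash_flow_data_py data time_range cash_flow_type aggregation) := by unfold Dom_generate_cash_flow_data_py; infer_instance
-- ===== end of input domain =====

-- B replaces A's running-sum accumulation by a CLOSED-FORM prefix-sum formula per year
-- (arithmetic-series sum plus a one-off correction for year 1); objective: alternative algorithm.
-- ===== PORT A =====
-- A's loop body: append annual (or last+annual when aggregation == "Cumulative") to both lists
def pvStepA (aggregation : String) (st : List Int × List Int) (year : Int) : List Int × List Int :=
  let buy_annual : Int := if year == 1 then -50000 else 15000 + (year - 1) * 500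
  let rent_annual : Int := -12000 - (year - 1) * 300
  if aggregation == "Cumulative" then
    (st.1 ++ [(match st.1.getLast? with | some v => v | none => 0) + buy_annual],
     st.2 ++ [(match st.2.getLast? with | some v => v | none => 0) + rent_annual])
  else
    (st.1 ++ [buy_annual], st.2 ++ [rent_annual])

def generate_cash_flow_data_py (data : Option Int) (time_range : Int × Int) (cash_flow_type : String) (aggregation : String) : List (String × List Int) :=
  let years := PySem.List.pyRange time_range.1 (time_range.2 + 1) 1
  let cf := years.foldl (pvStepA aggregation) ([], [])
  [("years", years), ("buy_cash_flow", cf.1), ("rent_cash_flow", cf.2)]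

-- ===== PORT B =====
-- buy_total(y): cumulative buy cash flow through year y, in closed form
def pvBuyTotal (start : Int) (y : Int) : Int :=
  let n := y - start + 1
  let t := PySem.Int.floordiv (n * (start + y - 2)) 2
  let total := 15000 * n + 500 * t
  if start ≤ 1 ∧ 1 ≤ y then total - 65000 else total

-- rent_total(y): cumulative rent cash flow through year y, in closed form
def pvRentTotal (start : Int) (y : Int) : Int :=
  let n := y - start + 1
  let t := PySem.Int.floordiv (n * (start + y - 2)) 2
  let total := -12000 * n - 300 * t
  total

def generate_cash_flow_data_py_alt (data : Option Int) (time_range : Int × Int) (cash_flow_type : String) (aggregation : String) : List (String × List Int) :=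
  let years := PySem.List.pyRange time_range.1 (time_range.2 + 1) 1
  if aggregation == "Cumulative" then
    [("years", years),
     ("buy_cash_flow", years.map (pvBuyTotal time_range.1)),
     ("rent_cash_flow", years.map (pvRentTotal time_range.1))]
  else
    [("years", years),
     ("buy_cash_flow", years.map (fun y => if y == 1 then -50000 else 15000 + (y - 1) * 500)),
     ("rent_cash_flow", years.map (fun y => -12000 - (y - 1) * 300))]

-- ===== PRECONDITION & SPEC =====
def Spec_generate_cash_flow_data_py (data : Option Int) (time_range : Int × Int) (cash_flow_type : String) (aggregation : String) (out : List (String × List Int)) : Prop := out = generate_cash_flow_data_py_alt data time_range cash_flow_type aggregation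
instance (data : Option Int) (time_range : Int × Int) (cash_flow_type : String) (aggregation : String) (out : List (String × List Int)) : Decidable (Spec_generate_cash_flow_data_py data time_range cash_flow_type aggregation out) := by unfold Spec_generate_cash_flow_data_py; infer_instance

-- ===== CLAIM (what is proved, stated in full; the proofs are below) =====
def Claim_equal_generate_cash_flow_data_py : Prop := ∀ (data : Option Int) (time_range : Int × Int) (cash_flow_type : String) (aggregation : String), Dom_generate_cash_flow_data_py data time_range cash_flow_type aggregation → Spec_generate_cash_flow_data_py data time_range cash_flow_type aggregation (generate_cash_flow_data_py data time_range cash_flow_type aggregation)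

-- ===== LEMMAS AND PROOFS =====

def pvLastD (xs : List Int) : Int := match xs.getLast? with | some v => v | none => 0

-- running-sum list (itertools.accumulate), used only to characterize A's fold
def pvAccum (acc : Int) : List Int → List Int
  | [] => []
  | x :: xs => (acc + x) :: pvAccum (acc + x) xs

theorem pvLastD_append (a : List Int) (x : Int) : pvLastD (a ++ [x]) = x := by
  simp [pvLastD]

theorem foldl_stepA_annual (agg : String) (h : (agg == "Cumulative") = false)
    (f g : Int → Int)
    (hf : ∀ y : Int, f y = if y == 1 then -50000 else 15000 + (y - 1) * 500)
    (hg : ∀ y : Int, g y = -12000 - (y - 1) * 300) :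
    ∀ (l : List Int) (a b : List Int),
      l.foldl (pvStepA agg) (a, b) = (a ++ l.map f, b ++ l.map g) := by
  intro l
  induction l with
  | nil => intro a b; simp
  | cons y t ih =>
    intro a b
    simp only [List.foldl_cons, List.map_cons]
    rw [show pvStepA agg (a, b) y = (a ++ [f y], b ++ [g y]) by
      simp [pvStepA, h, hf, hg], ih]
    simp

theorem foldl_stepA_cum (agg : String) (h : (agg == "Cumulative") = true)
    (f g : Int → Int)
    (hf : ∀ y : Int, f y = if y == 1 then -50000 else 15000 + (y - 1) * 500)
    (hg : ∀ y : Int, g y = -12000 - (y - 1) * 300) :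
    ∀ (l : List Int) (a b : List Int),
      l.foldl (pvStepA agg) (a, b)
        = (a ++ pvAccum (pvLastD a) (l.map f), b ++ pvAccum (pvLastD b) (l.map g)) := by
  intro l
  induction l with
  | nil => intro a b; simp [pvAccum]
  | cons y t ih =>
    intro a b
    simp only [List.foldl_cons, List.map_cons, pvAccum]
    rw [show pvStepA agg (a, b) y = (a ++ [pvLastD a + f y], b ++ [pvLastD b + g y]) by
      simp [pvStepA, h, hf, hg, pvLastD], ih]
    simp [pvLastD_append]

theorem pvFloordivHalf (a m : Int) (h : a = m + m) : PySem.Int.floordiv a 2 = m := by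
  rw [PySem.Int.floordiv_eq_iff_of_pos (by norm_num)]; omega

theorem pvEvenProd (s y : Int) : ∃ m : Int, (y - s + 1) * (s + y - 2) = m + m := by
  rcases Int.even_or_odd (y - s) with ⟨a, ha⟩ | ⟨a, ha⟩
  · exact ⟨(y - s + 1) * (a + s - 1), by linear_combination (y - s + 1) * ha⟩
  · exact ⟨(a + 1) * (s + y - 2), by linear_combination (s + y - 2) * ha⟩

theorem pvBuyTotal_base (s : Int) : pvBuyTotal s (s - 1) = 0 := by
  have h0 : ((s - 1) - s + 1) * (s + (s - 1) - 2) = 0 + 0 := by ring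
  simp only [pvBuyTotal, pvFloordivHalf _ 0 h0]
  split_ifs <;> omega

theorem pvRentTotal_base (s : Int) : pvRentTotal s (s - 1) = 0 := by
  have h0 : ((s - 1) - s + 1) * (s + (s - 1) - 2) = 0 + 0 := by ring
  simp only [pvRentTotal, pvFloordivHalf _ 0 h0]
  omega

theorem pvBuyTotal_step (s y : Int) (hy : s ≤ y) :
    pvBuyTotal s y = pvBuyTotal s (y - 1) + (if y == 1 then -50000 else 15000 + (y - 1) * 500) := by
  obtain ⟨m1, h1⟩ := pvEvenProd s y
  obtain ⟨m2, h2⟩ := pvEvenProd s (y - 1)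
  have hk : (y - s + 1) * (s + y - 2) = ((y - 1) - s + 1) * (s + (y - 1) - 2) + 2 * (y - 1) := by
    ring
  have hm : m1 = m2 + (y - 1) := by linarith
  simp only [pvBuyTotal, pvFloordivHalf _ m1 h1, pvFloordivHalf _ m2 h2, beq_iff_eq]
  split_ifs <;> omega

theorem pvRentTotal_step (s y : Int) :
    pvRentTotal s y = pvRentTotal s (y - 1) + (-12000 - (y - 1) * 300) := by
  obtain ⟨m1, h1⟩ := pvEvenProd s y
  obtain ⟨m2, h2⟩ := pvEvenProd s (y - 1)
  have hk : (y - s + 1) * (s + y - 2) = ((y - 1) - s + 1) * (s + (y - 1) - 2) + 2 * (y - 1) := by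
    ring
  have hm : m1 = m2 + (y - 1) := by linarith
  simp only [pvRentTotal, pvFloordivHalf _ m1 h1, pvFloordivHalf _ m2 h2]
  omega

-- accumulate of per-year values f equals the map of the closed-form totals g
theorem pvAccum_eq_map (f g : Int → Int) (b : Int) (hstep : ∀ y : Int, b ≤ y → g y = g (y - 1) + f y) :
    ∀ (n : ℕ) (s e : Int), b ≤ s → (e - s).toNat ≤ n →
      pvAccum (g (s - 1)) ((PySem.List.pyRange s e 1).map f)
        = (PySem.List.pyRange s e 1).map g := by
  intro n
  induction n with
  | zero =>
    intro s e hb h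
    rw [PySem.List.pyRange_one_eq_nil (by omega)]
    simp [pvAccum]
  | succ n ih =>
    intro s e hb h
    by_cases hse : s < e
    · rw [PySem.List.pyRange_one_cons hse]
      simp only [List.map_cons, pvAccum]
      rw [show g (s - 1) + f s = g s from (hstep s hb).symm]
      have := ih (s + 1) e (by omega) (by omega)
      rw [show s + 1 - 1 = s from by ring] at this
      rw [this]
    · rw [PySem.List.pyRange_one_eq_nil (by omega)]
      simp [pvAccum]

-- ===== VERDICT (by name: the statement is the Claim_ definition above) =====
theorem generate_cash_flow_data_py_spec : Claim_equal_generate_cash_flow_data_py := by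
  intro data tr cft agg _
  unfold Spec_generate_cash_flow_data_py generate_cash_flow_data_py generate_cash_flow_data_py_alt
  dsimp only
  by_cases h : (agg == "Cumulative") = true
  · rw [foldl_stepA_cum agg h _ _ (fun y => rfl) (fun y => rfl)]
    have hb : pvLastD ([] : List Int) = pvBuyTotal tr.1 (tr.1 - 1) := by
      rw [pvBuyTotal_base]; rfl
    have hr : pvLastD ([] : List Int) = pvRentTotal tr.1 (tr.1 - 1) := by
      rw [pvRentTotal_base]; rfl
    simp only [h, if_true, List.nil_append]
    rw [hb, pvAccum_eq_map _ _ tr.1 (fun y hy => pvBuyTotal_step tr.1 y hy) (tr.2 + 1 - tr.1).toNat tr.1 (tr.2 + 1) (le_refl _) (le_refl _)]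
    rw [pvBuyTotal_base, ← pvRentTotal_base]
    rw [pvAccum_eq_map _ _ tr.1 (fun y _ => pvRentTotal_step tr.1 y) (tr.2 + 1 - tr.1).toNat tr.1 (tr.2 + 1) (le_refl _) (le_refl _)]
  · rw [foldl_stepA_annual agg (by simpa using h) _ _ (fun y => rfl) (fun y => rfl)]
    simp [h]
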